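-- pv_equiv track=rewrite | github.com/the-omega-institute/automath | theory/2026_golden_ratio_driven_scan_projection_generation_recursive_emergence/scripts/exp_fold_collision_kernel_a2_search.py | quad_form_one
-- ===== SOURCE A (Python) =====
-- from typing import Dict, List, Optional, Tuple
--
-- def matmul3(X: List[List[int]], Y: List[List[int]]) -> List[List[int]]:
--     Z = [[0, 0, 0] for _ in range(3)]
--     for i in range(3):
--         for k in range(3):
--             xik = X[i][k]
--             if xik == 0:
--                 continue
--             for j in range(3):
--                 Z[i][j] += xik * Y[k][j]
--     return Z
--
-- def matpow3(A: List[List[int]], e: int) -> List[List[int]]: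
--     P = [[1, 0, 0], [0, 1, 0], [0, 0, 1]]
--     B = [row[:] for row in A]
--     while e > 0:
--         if e & 1:
--             P = matmul3(P, B)
--         B = matmul3(B, B)
--         e >>= 1
--     return P
--
-- def quad_form_one(A: List[List[int]], e: int) -> int:
--     """Return 2 * 1^T A^e 1."""
--     P = matpow3(A, e)
--     one = [1, 1, 1]
--     s = 0
--     for i in range(3):
--         for j in range(3):
--             s += one[i] * P[i][j] * one[j]
--     return 2 * s
-- ===== SOURCE B (Python) =====
-- def quad_form_one(A, e):
--     """Return 2 * 1^T A^e 1."""
--     x = y = z = 1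
--     for _ in range(e if e > 0 else 0):
--         x, y, z = (A[0][0] * x + A[0][1] * y + A[0][2] * z,
--                    A[1][0] * x + A[1][1] * y + A[1][2] * z,
--                    A[2][0] * x + A[2][1] * y + A[2][2] * z)
--     return 2 * (x + y + z)
-- ===== Notes on version B (the rewrite author's own statement) =====
-- stated objective: simpler
-- what changed: Replaces binary matrix exponentiation (matpow3/matmul3 plus a quadratic-form double loop) by e repeated fully-unrolled updates of three scalar accumulators started at (1,1,1), using sum(A^e 1) = 1^T A^e 1; returns 2*(x+y+z).
-- outside the precondition, e.g. on quad_form_one([[1]], 2): A raises IndexError, B raises IndexError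
import Mathlib
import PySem

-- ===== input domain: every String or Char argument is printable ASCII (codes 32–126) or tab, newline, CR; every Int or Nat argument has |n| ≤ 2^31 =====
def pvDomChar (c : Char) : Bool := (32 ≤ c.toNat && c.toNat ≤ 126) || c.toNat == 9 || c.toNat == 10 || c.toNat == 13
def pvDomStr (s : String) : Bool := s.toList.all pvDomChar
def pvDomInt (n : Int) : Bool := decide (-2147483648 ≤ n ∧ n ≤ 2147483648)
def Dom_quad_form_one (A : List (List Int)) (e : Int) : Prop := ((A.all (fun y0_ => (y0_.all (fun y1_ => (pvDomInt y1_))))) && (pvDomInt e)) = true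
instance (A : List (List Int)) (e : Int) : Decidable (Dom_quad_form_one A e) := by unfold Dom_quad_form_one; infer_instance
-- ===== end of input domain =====

-- B replaces A's binary matrix exponentiation by e fully-unrolled scalar-triple updates started at (1,1,1) (simpler decomposition, not faster).

-- ===== PORT A =====

-- X[i][k] on a list-of-lists (used only at indices Pre_ keeps in range; default 0 outside)
def pvGet2 (X : List (List Int)) (i k : Nat) : Int := (X.getD i []).getD k 0

-- the innermost j-loop of matmul3 ('Z[i][j] += xik * Y[k][j]' for j = 0,1,2), as a named helper
def mmInner (Y : List (List Int)) (i k : Nat) (xik : Int) (Z : List (List Int)) : List (List Int) :=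
  (List.range 3).foldl (fun Z j =>
    Z.set i ((Z.getD i []).set j (pvGet2 Z i j + xik * pvGet2 Y k j))) Z

def matmul3 (X Y : List (List Int)) : List (List Int) :=
  (List.range 3).foldl (fun Z i =>
    (List.range 3).foldl (fun Z k =>
      let xik := pvGet2 X i k
      if xik = 0 then Z
      else mmInner Y i k xik Z) Z)
    [[0, 0, 0], [0, 0, 0], [0, 0, 0]]

def matpow3.loop (P B : List (List Int)) (e : Int) : List (List Int) :=
  if 0 < e then
    matpow3.loop (if PySem.Int.mod e 2 = 1 then matmul3 P B else P) (matmul3 B B)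
      (PySem.Int.floordiv e 2)
  else P
termination_by e.toNat
decreasing_by
  rename_i h
  rw [PySem.Int.floordiv_eq_ediv_of_pos (by omega)]
  omega

def matpow3 (A : List (List Int)) (e : Int) : List (List Int) :=
  matpow3.loop [[1, 0, 0], [0, 1, 0], [0, 0, 1]] (A.map (fun r => r)) e

def quad_form_one (A : List (List Int)) (e : Int) : Int :=
  let P := matpow3 A e
  let one : List Int := [1, 1, 1]
  let s := (List.range 3).foldl (fun s i =>
    (List.range 3).foldl (fun s j =>
      s + one.getD i 0 * pvGet2 P i j * one.getD j 0) s) 0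
  2 * s

-- ===== PORT B =====

-- 'for _ in range(e if e > 0 else 0)' with the simultaneous triple assignment,
-- as structural recursion on the remaining iteration count (the step is loop-invariant,
-- so counting down performs the same iterations as Python's counted loop).
def altIter (A : List (List Int)) : Nat → Int × Int × Int → Int × Int × Int
  | 0, v => v
  | n + 1, (x, y, z) =>
      altIter A n
        (pvGet2 A 0 0 * x + pvGet2 A 0 1 * y + pvGet2 A 0 2 * z,
         pvGet2 A 1 0 * x + pvGet2 A 1 1 * y + pvGet2 A 1 2 * z,
         pvGet2 A 2 0 * x + pvGet2 A 2 1 * y + pvGet2 A 2 2 * z)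

def quad_form_one_alt (A : List (List Int)) (e : Int) : Int :=
  match altIter A e.toNat (1, 1, 1) with
  | (x, y, z) => 2 * (x + y + z)

-- ===== PRECONDITION & SPEC =====
-- When e > 0 Python indexes the first three entries of the first three rows of A
-- (IndexError otherwise); when e ≤ 0 no indexing of A happens and any A is accepted.
def Pre_quad_form_one (A : List (List Int)) (e : Int) : Prop :=
  0 < e → (3 ≤ A.length ∧ ∀ r ∈ A.take 3, 3 ≤ r.length)
instance (A : List (List Int)) (e : Int) : Decidable (Pre_quad_form_one A e) := by
  unfold Pre_quad_form_one; infer_instance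

def pvWitness_quad_form_one : List (List Int) × Int := ([[1, 1, 0], [0, 1, 1], [1, 0, 1]], 5)

def Spec_quad_form_one (A : List (List Int)) (e : Int) (out : Int) : Prop := out = quad_form_one_alt A e
instance (A : List (List Int)) (e : Int) (out : Int) : Decidable (Spec_quad_form_one A e out) := by unfold Spec_quad_form_one; infer_instance

-- ===== CLAIM (what is proved, stated in full; the proofs are below) =====
def Claim_equal_quad_form_one : Prop := ∀ (A : List (List Int)) (e : Int), Dom_quad_form_one A e → Pre_quad_form_one A e → Spec_quad_form_one A e (quad_form_one A e)

-- ===== LEMMAS AND PROOFS =====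

def toMat (X : List (List Int)) : Matrix (Fin 3) (Fin 3) ℤ := fun i j => pvGet2 X i j

def toVecT (v : Int × Int × Int) : Fin 3 → ℤ := fun i =>
  match i with
  | 0 => v.1
  | 1 => v.2.1
  | 2 => v.2.2

theorem mmInner_eval0 (Y : List (List Int)) (k : Nat) (x : Int)
    (a b c d e f g h i' : Int) :
    mmInner Y 0 k x [[a, b, c], [d, e, f], [g, h, i']]
      = [[a + x * pvGet2 Y k 0, b + x * pvGet2 Y k 1, c + x * pvGet2 Y k 2],
         [d, e, f], [g, h, i']] := by
  simp [mmInner, List.range_succ, pvGet2]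

theorem mmInner_eval1 (Y : List (List Int)) (k : Nat) (x : Int)
    (a b c d e f g h i' : Int) :
    mmInner Y 1 k x [[a, b, c], [d, e, f], [g, h, i']]
      = [[a, b, c],
         [d + x * pvGet2 Y k 0, e + x * pvGet2 Y k 1, f + x * pvGet2 Y k 2],
         [g, h, i']] := by
  simp [mmInner, List.range_succ, pvGet2]

theorem mmInner_eval2 (Y : List (List Int)) (k : Nat) (x : Int)
    (a b c d e f g h i' : Int) :
    mmInner Y 2 k x [[a, b, c], [d, e, f], [g, h, i']]
      = [[a, b, c], [d, e, f],
         [g + x * pvGet2 Y k 0, h + x * pvGet2 Y k 1, i' + x * pvGet2 Y k 2]] := by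
  simp [mmInner, List.range_succ, pvGet2]

theorem pv_ite_mat3 (c : Prop) [inst : Decidable c] (p00 p01 p02 p10 p11 p12 p20 p21 p22 q00 q01 q02 q10 q11 q12 q20 q21 q22 : Int) :
    (if c then ([[p00, p01, p02], [p10, p11, p12], [p20, p21, p22]] : List (List Int)) else [[q00, q01, q02], [q10, q11, q12], [q20, q21, q22]])
      = [[if c then p00 else q00, if c then p01 else q01, if c then p02 else q02], [if c then p10 else q10, if c then p11 else q11, if c then p12 else q12], [if c then p20 else q20, if c then p21 else q21, if c then p22 else q22]] := by
  split_ifs <;> rfl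

theorem pv_ite_zero_mul (x a y : Int) : (if x = 0 then a else a + x * y) = a + x * y := by
  split_ifs with h
  · rw [h]; ring
  · rfl

set_option maxHeartbeats 800000 in
theorem matmul3_eval (X Y : List (List Int)) :
    matmul3 X Y =
      [[0 + pvGet2 X 0 0 * pvGet2 Y 0 0 + pvGet2 X 0 1 * pvGet2 Y 1 0 + pvGet2 X 0 2 * pvGet2 Y 2 0, 0 + pvGet2 X 0 0 * pvGet2 Y 0 1 + pvGet2 X 0 1 * pvGet2 Y 1 1 + pvGet2 X 0 2 * pvGet2 Y 2 1, 0 + pvGet2 X 0 0 * pvGet2 Y 0 2 + pvGet2 X 0 1 * pvGet2 Y 1 2 + pvGet2 X 0 2 * pvGet2 Y 2 2], [0 + pvGet2 X 1 0 * pvGet2 Y 0 0 + pvGet2 X 1 1 * pvGet2 Y 1 0 + pvGet2 X 1 2 * pvGet2 Y 2 0, 0 + pvGet2 X 1 0 * pvGet2 Y 0 1 + pvGet2 X 1 1 * pvGet2 Y 1 1 + pvGet2 X 1 2 * pvGet2 Y 2 1, 0 + pvGet2 X 1 0 * pvGet2 Y 0 2 + pvGet2 X 1 1 * pvGet2 Y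 1 2 + pvGet2 X 1 2 * pvGet2 Y 2 2], [0 + pvGet2 X 2 0 * pvGet2 Y 0 0 + pvGet2 X 2 1 * pvGet2 Y 1 0 + pvGet2 X 2 2 * pvGet2 Y 2 0, 0 + pvGet2 X 2 0 * pvGet2 Y 0 1 + pvGet2 X 2 1 * pvGet2 Y 1 1 + pvGet2 X 2 2 * pvGet2 Y 2 1, 0 + pvGet2 X 2 0 * pvGet2 Y 0 2 + pvGet2 X 2 1 * pvGet2 Y 1 2 + pvGet2 X 2 2 * pvGet2 Y 2 2]] := by
  simp only [matmul3, List.range_succ, List.range_zero, List.nil_append, List.cons_append,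
    List.foldl_cons, List.foldl_nil, mmInner_eval0, mmInner_eval1, mmInner_eval2,
    pv_ite_mat3, pv_ite_zero_mul, ite_self]

theorem toMat_matmul3 (X Y : List (List Int)) : toMat (matmul3 X Y) = toMat X * toMat Y := by
  ext i j
  rw [matmul3_eval]
  fin_cases i <;> fin_cases j <;>
    simp [toMat, pvGet2, Matrix.mul_apply, Fin.sum_univ_three]

theorem toMat_id : toMat [[1, 0, 0], [0, 1, 0], [0, 0, 1]] = 1 := by
  ext i j
  fin_cases i <;> fin_cases j <;> simp [toMat, pvGet2]

theorem matpow3_loop_eq (P B : List (List Int)) (e : Int) :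
    toMat (matpow3.loop P B e) = toMat P * (toMat B) ^ e.toNat := by
  by_cases h : 0 < e
  · rw [matpow3.loop, if_pos h]
    rw [matpow3_loop_eq]
    have hf : (PySem.Int.floordiv e 2).toNat = e.toNat / 2 := by
      rw [PySem.Int.floordiv_eq_ediv_of_pos (by omega)]; omega
    have hm : (PySem.Int.mod e 2 = 1) ↔ e.toNat % 2 = 1 := by
      rw [PySem.Int.mod_eq_emod_of_pos (by omega)]; omega
    rw [hf, toMat_matmul3]
    have key : ∀ M : Matrix (Fin 3) (Fin 3) ℤ,
        M ^ (e.toNat % 2) * (M * M) ^ (e.toNat / 2) = M ^ e.toNat := by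
      intro M
      rw [← pow_two, ← pow_mul, ← pow_add]
      congr 1
      omega
    by_cases ho : PySem.Int.mod e 2 = 1
    · rw [if_pos ho, toMat_matmul3, mul_assoc]
      congr 1
      have hk := key (toMat B)
      rw [hm.mp ho, pow_one] at hk
      exact hk
    · rw [if_neg ho]
      have h0 : e.toNat % 2 = 0 := by
        rw [PySem.Int.mod_eq_emod_of_pos (by omega)] at ho; omega
      congr 1
      calc (toMat B * toMat B) ^ (e.toNat / 2)
          = toMat B ^ (e.toNat % 2) * (toMat B * toMat B) ^ (e.toNat / 2) := by
            rw [h0, pow_zero, one_mul]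
        _ = toMat B ^ e.toNat := key _
  · rw [matpow3.loop, if_neg h]
    have : e.toNat = 0 := by omega
    rw [this, pow_zero, mul_one]
termination_by e.toNat
decreasing_by
  rw [PySem.Int.floordiv_eq_ediv_of_pos (by omega)]; omega

theorem toVecT_step (A : List (List Int)) (x y z : Int) :
    toVecT (pvGet2 A 0 0 * x + pvGet2 A 0 1 * y + pvGet2 A 0 2 * z,
            pvGet2 A 1 0 * x + pvGet2 A 1 1 * y + pvGet2 A 1 2 * z,
            pvGet2 A 2 0 * x + pvGet2 A 2 1 * y + pvGet2 A 2 2 * z)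
      = (toMat A).mulVec (toVecT (x, y, z)) := by
  funext i
  fin_cases i <;>
    simp [toVecT, toMat, Matrix.mulVec, dotProduct, Fin.sum_univ_three]

theorem altIter_eq (A : List (List Int)) (n : Nat) (v : Int × Int × Int) :
    toVecT (altIter A n v) = ((toMat A) ^ n).mulVec (toVecT v) := by
  induction n generalizing v with
  | zero => simp [altIter]
  | succ n ih =>
    obtain ⟨x, y, z⟩ := v
    rw [altIter, ih, toVecT_step, Matrix.mulVec_mulVec, ← pow_succ]

-- ===== VERDICT (by name: the statement is the Claim_ definition above) =====
theorem quad_form_one_spec : Claim_equal_quad_form_one := by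
  intro A e _ _
  unfold Spec_quad_form_one quad_form_one quad_form_one_alt matpow3
  have hP := matpow3_loop_eq [[1, 0, 0], [0, 1, 0], [0, 0, 1]] (A.map (fun r => r)) e
  rw [toMat_id, one_mul] at hP
  rw [List.map_id'] at hP
  have hv := altIter_eq A e.toNat (1, 1, 1)
  have hv1 : toVecT (1, 1, 1) = fun _ => (1 : ℤ) := by
    funext i; fin_cases i <;> simp [toVecT]
  rw [hv1] at hv
  rcases hu : altIter A e.toNat (1, 1, 1) with ⟨x, y, z⟩
  rw [hu] at hv
  have h0 := congrFun hv 0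
  have h1 := congrFun hv 1
  have h2 := congrFun hv 2
  rw [← hP] at h0 h1 h2
  simp only [toVecT, toMat, Matrix.mulVec, dotProduct, Fin.sum_univ_three, mul_one] at h0 h1 h2
  norm_num [show ((0 : Fin 3) : Nat) = 0 from rfl, show ((1 : Fin 3) : Nat) = 1 from rfl,
    show ((2 : Fin 3) : Nat) = 2 from rfl] at h0 h1 h2
  simp only [List.range_succ, List.range_zero, List.nil_append, List.cons_append,
    List.foldl_cons, List.foldl_nil, List.getD]
  simp only [List.getElem?_cons_zero, List.getElem?_cons_succ, Option.getD_some, one_mul, mul_one]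
  rw [h0, h1, h2]
  simp only [List.map_id']
  ring
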